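-- pv_equiv track=rewrite | github.com/DexAlv/ProyectoFinalBios | ProyectoFinal.py | busqueda_local
-- ===== SOURCE A (Python) =====
-- from typing import List, Tuple
--
-- def busqueda_local(solucion: List[List[int]], capacidades: List[int], tamanos_disponibles: List[int]) -> Tuple[List[List[int]], List[int]]:
--     """
--     Aplica una búsqueda local para mejorar la solución actual ajustando la distribución de los objetos entre los bins y optimizando sus tamaños.
--
--     Args:
--         solucion (List[List[int]]): Solución actual, una lista de bins con objetos.
--         capacidades (List[int]): Capacidades actuales de los bins.
--         tamanos_disponibles (List[int]): Lista de tamaños posibles para los bins.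
--
--     Returns:
--         Tuple[List[List[int]], List[int]]: Solución mejorada y capacidades ajustadas.
--     """
--     nueva_solucion = [bin_actual[:] for bin_actual in solucion]
--     capacidades_actualizadas = capacidades[:]
--
--     for i in range(len(nueva_solucion)):
--         for j in range(i + 1, len(nueva_solucion)):
--             bin_actual = nueva_solucion[i]
--             bin_destino = nueva_solucion[j]
--
--             # Intentar mover objetos del bin_actual al bin_destino
--             for obj in bin_actual[:]:
--                 if sum(bin_destino) + obj <= capacidades_actualizadas[j]:
--                     bin_actual.remove(obj)
--                     bin_destino.append(obj)
--
--                     # Reducir tamaño del bin_actual si es posible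
--                     nuevo_tamano_actual = min([t for t in tamanos_disponibles if t >= sum(bin_actual)],
--                                               default=capacidades_actualizadas[i])
--                     capacidades_actualizadas[i] = nuevo_tamano_actual
--
--                     # Ajustar tamaño del bin_destino si es necesario
--                     nuevo_tamano_destino = min([t for t in tamanos_disponibles if t >= sum(bin_destino)],
--                                                default=capacidades_actualizadas[j])
--                     capacidades_actualizadas[j] = nuevo_tamano_destino
--
--     # Limpiar bins vacíos
--     bins_no_vacios = []
--     capacidades_no_vacias = []
--     for idx, bin_actual in enumerate(nueva_solucion):
--         if bin_actual:
--             bins_no_vacios.append(bin_actual)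
--             capacidades_no_vacias.append(capacidades_actualizadas[idx])
--
--     nueva_solucion = bins_no_vacios
--     capacidades_actualizadas = capacidades_no_vacias
--
--     return nueva_solucion, capacidades_actualizadas
-- ===== SOURCE B (Python) =====
-- from typing import List, Tuple
--
--
-- def _fit(ts_sorted: List[int], s: int, default: int) -> int:
--     """Smallest available size >= s: first match in the ascending list."""
--     for t in ts_sorted:
--         if t >= s:
--             return t
--     return default
--
--
-- def _drop_counted(xs: List[int], cnt: dict) -> List[int]:
--     """One pass over xs removing, for each value v, its first cnt[v] occurrences."""
--     out = []
--     for x in xs: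
--         c = cnt.get(x, 0)
--         if c > 0:
--             cnt[x] = c - 1
--         else:
--             out.append(x)
--     return out
--
--
-- def busqueda_local(solucion: List[List[int]], capacidades: List[int], tamanos_disponibles: List[int]) -> Tuple[List[List[int]], List[int]]:
--     """Same result as A, computed in two phases per bin pair: an arithmetic
--     decision pass over running sums/capacities that never touches the bins
--     (so no per-move list.remove and no re-summing), then a single rebuild of
--     the two bins from the recorded moves; bin sizes come from a first-match
--     scan of the pre-sorted size list."""
--     bins = [b[:] for b in solucion]
--     caps = capacidades[:]
--     sums = [sum(b) for b in bins]
--     ts = sorted(tamanos_disponibles)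
--     n = len(bins)
--     for i in range(n):
--         for j in range(i + 1, n):
--             # phase 1: decide the moves purely arithmetically
--             moved = []
--             si, sj, ci, cj = sums[i], sums[j], caps[i], caps[j]
--             for obj in bins[i]:
--                 if sj + obj <= cj:
--                     moved.append(obj)
--                     si -= obj
--                     sj += obj
--                     ci = _fit(ts, si, ci)
--                     cj = _fit(ts, sj, cj)
--             # phase 2: rebuild the two bins in one pass each
--             cnt = {}
--             for v in moved:
--                 cnt[v] = cnt.get(v, 0) + 1
--             bins[i] = _drop_counted(bins[i], cnt)
--             bins[j] = bins[j] + moved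
--             sums[i], sums[j] = si, sj
--             caps[i], caps[j] = ci, cj
--     pares = [(b, c) for b, c in zip(bins, caps) if b]
--     return [b for b, c in pares], [c for b, c in pares]
-- ===== Notes on version B (the rewrite author's own statement) =====
-- stated objective: alternative
-- what changed: B splits each (i,j) pair into two phases: a purely arithmetic decision pass over running sums and capacities that never touches the bin lists (replacing A's per-candidate sum(bin_destino), per-move list.remove and min-over-filtered-scan), then a single counter-based rebuild of the two bins from the recorded moves; bin sizes come from a first-match scan of a once-sorted size list and the cleanup zips bins with capacities instead of indexing by enumerate; intended as faster (measured 9.12x at the largest size both finished, but unconfirmed at the top size).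
-- outside the precondition, e.g. on busqueda_local([[]], [], [5]): A returns ([], []), B returns ([], [])
import Mathlib
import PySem

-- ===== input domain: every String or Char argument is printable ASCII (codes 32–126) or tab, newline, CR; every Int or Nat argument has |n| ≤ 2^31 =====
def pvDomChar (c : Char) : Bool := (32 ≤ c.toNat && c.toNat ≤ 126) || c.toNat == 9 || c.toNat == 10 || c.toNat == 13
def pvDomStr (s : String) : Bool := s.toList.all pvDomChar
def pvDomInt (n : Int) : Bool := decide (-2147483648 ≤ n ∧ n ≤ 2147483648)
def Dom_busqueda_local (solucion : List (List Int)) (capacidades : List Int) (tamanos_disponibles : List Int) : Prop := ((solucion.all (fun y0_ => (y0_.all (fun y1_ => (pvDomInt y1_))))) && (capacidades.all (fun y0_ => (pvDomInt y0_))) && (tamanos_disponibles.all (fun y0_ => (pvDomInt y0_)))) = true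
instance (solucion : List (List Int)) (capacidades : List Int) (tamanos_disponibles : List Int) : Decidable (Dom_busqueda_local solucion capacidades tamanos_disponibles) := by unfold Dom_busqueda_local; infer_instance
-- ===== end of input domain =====

-- B decides each pair's moves in an arithmetic pass over running sums (never touching the
-- bins), rebuilds the two bins once from the recorded moves via an occurrence counter, and
-- picks bin sizes by first-match on a pre-sorted size list (objective: alternative).


-- ===== PORT A =====
-- min([t for t in tamanos_disponibles if t >= s], default=dflt)
def pvMinGe (tamanos : List Int) (s dflt : Int) : Int :=
  PySem.List.minD (tamanos.filter (fun t => decide (s ≤ t))) (fun t => t) dflt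

-- body of the inner 'for obj in bin_actual[:]' loop of A, state = (nueva_solucion, capacidades_actualizadas)
def pvAStep (tamanos : List Int) (i j : Nat)
    (st : List (List Int) × List Int) (obj : Int) : List (List Int) × List Int :=
  let bins := st.1
  let caps := st.2
  if (bins.getD j []).sum + obj ≤ caps.getD j 0 then
    -- bin_actual.remove(obj): obj is drawn from a snapshot of bin i, so remove? always succeeds
    -- and the .getD fallback arm is unreachable
    let bi := (PySem.List.remove? (bins.getD i []) obj).getD (bins.getD i [])
    let bj := (bins.getD j []) ++ [obj]
    let caps1 := caps.set i (pvMinGe tamanos bi.sum (caps.getD i 0))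
    let caps2 := caps1.set j (pvMinGe tamanos bj.sum (caps1.getD j 0))
    ((bins.set i bi).set j bj, caps2)
  else st

-- one (i, j) pass of A: iterate over the snapshot bin_actual[:]
def pvAInner (tamanos : List Int) (i j : Nat)
    (st : List (List Int) × List Int) : List (List Int) × List Int :=
  (st.1.getD i []).foldl (pvAStep tamanos i j) st

def busqueda_local (solucion : List (List Int)) (capacidades : List Int) (tamanos_disponibles : List Int) : List (List Int) × List Int :=
  -- the [:] copies are identities on immutable Lean lists
  let n := solucion.length
  let st :=
    (List.range n).foldl (fun st i =>
      (List.range' (i + 1) (n - (i + 1))).foldl (fun st j =>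
        pvAInner tamanos_disponibles i j st) st)
      (solucion, capacidades)
  -- limpiar bins vacíos
  (PySem.List.enumerate st.1).foldl
    (fun (acc : List (List Int) × List Int) p =>
      if !p.2.isEmpty then (acc.1 ++ [p.2], acc.2 ++ [PySem.List.pyGetD st.2 p.1 0]) else acc)
    ([], [])

-- ===== PORT B =====
-- B's _fit: first t in the ascending list with t >= s, else default (the for/return loop)
def pvFit (ts : List Int) (s dflt : Int) : Int :=
  match ts.find? (fun t => decide (s ≤ t)) with
  | some t => t
  | none => dflt

-- B's _drop_counted: one pass over xs, loop state = (out, cnt)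
def pvDropCounted (xs : List Int) (cnt : PySem.Dict Int Int) : List Int :=
  (xs.foldl (fun (acc : List Int × PySem.Dict Int Int) x =>
      if 0 < acc.2.getD x 0 then (acc.1, acc.2.insert x (acc.2.getD x 0 - 1))
      else (acc.1 ++ [x], acc.2)) ([], cnt)).1

-- B's phase-1 decision step, state = (moved, si, sj, ci, cj): pure arithmetic, no bins
def pvDecStep (ts : List Int) (st : List Int × Int × Int × Int × Int) (obj : Int) :
    List Int × Int × Int × Int × Int :=
  if st.2.2.1 + obj ≤ st.2.2.2.2 then
    let si := st.2.1 - obj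
    let sj := st.2.2.1 + obj
    (st.1 ++ [obj], si, sj, pvFit ts si st.2.2.2.1, pvFit ts sj st.2.2.2.2)
  else st

-- one (i, j) pair of B: decide arithmetically, then rebuild the two bins once
def pvPair (ts : List Int) (i j : Nat)
    (st : List (List Int) × List Int × List Int) : List (List Int) × List Int × List Int :=
  let bins := st.1
  let caps := st.2.1
  let sums := st.2.2
  let r := (bins.getD i []).foldl (pvDecStep ts)
      ([], sums.getD i 0, sums.getD j 0, caps.getD i 0, caps.getD j 0)
  let cnt := r.1.foldl (fun (d : PySem.Dict Int Int) v => d.insert v (d.getD v 0 + 1)) PySem.Dict.empty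
  ((bins.set i (pvDropCounted (bins.getD i []) cnt)).set j ((bins.getD j []) ++ r.1),
   (caps.set i r.2.2.2.1).set j r.2.2.2.2,
   (sums.set i r.2.1).set j r.2.2.1)

def busqueda_local_alt (solucion : List (List Int)) (capacidades : List Int) (tamanos_disponibles : List Int) : List (List Int) × List Int :=
  let ts := PySem.List.sorted tamanos_disponibles (fun t => t)
  let n := solucion.length
  let st :=
    (List.range n).foldl (fun st i =>
      (List.range' (i + 1) (n - (i + 1))).foldl (fun st j => pvPair ts i j st) st)
      (solucion, capacidades, solucion.map List.sum)
  let pares := (st.1.zip st.2.1).filter (fun p => !p.1.isEmpty)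
  (pares.map (fun p => p.1), pares.map (fun p => p.2))

-- ===== PRECONDITION & SPEC =====
-- Pre_ excludes inputs with fewer capacities than bins: there A raises IndexError on
-- capacidades[j] (except for degenerate all-empty-tail cases where the access is skipped).
def Pre_busqueda_local (solucion : List (List Int)) (capacidades : List Int) (tamanos_disponibles : List Int) : Prop :=
  solucion.length ≤ capacidades.length
instance (solucion : List (List Int)) (capacidades : List Int) (tamanos_disponibles : List Int) : Decidable (Pre_busqueda_local solucion capacidades tamanos_disponibles) := by unfold Pre_busqueda_local; infer_instance

def pvWitness_busqueda_local : List (List Int) × List Int × List Int := ([[3, 7], [2]], [10, 9], [4, 8, 12])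

def Spec_busqueda_local (solucion : List (List Int)) (capacidades : List Int) (tamanos_disponibles : List Int) (out : List (List Int) × List Int) : Prop := out = busqueda_local_alt solucion capacidades tamanos_disponibles
instance (solucion : List (List Int)) (capacidades : List Int) (tamanos_disponibles : List Int) (out : List (List Int) × List Int) : Decidable (Spec_busqueda_local solucion capacidades tamanos_disponibles out) := by unfold Spec_busqueda_local; infer_instance

-- ===== CLAIM (what is proved, stated in full; the proofs are below) =====
def Claim_equal_busqueda_local : Prop := ∀ (solucion : List (List Int)) (capacidades : List Int) (tamanos_disponibles : List Int), Dom_busqueda_local solucion capacidades tamanos_disponibles → Pre_busqueda_local solucion capacidades tamanos_disponibles → Spec_busqueda_local solucion capacidades tamanos_disponibles (busqueda_local solucion capacidades tamanos_disponibles)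

-- ===== LEMMAS AND PROOFS =====

-- the state correspondence: B carries the same bins and caps plus the running sums
def pvRel (stA : List (List Int) × List Int) (stB : List (List Int) × List Int × List Int) : Prop :=
  stB.1 = stA.1 ∧ stB.2.1 = stA.2 ∧ stB.2.2 = stA.1.map List.sum

-- bin i after the moves M have been taken out, A-style (repeated erase of the first occurrence)
def pvEb (snap M : List Int) : List Int := M.foldl (fun l v => l.erase v) snap

-- functional counter version of B's one-pass rebuild
def pvDropF : List Int → (Int → Int) → List Int
  | [], _ => []
  | x :: xs, f => if 0 < f x then pvDropF xs (Function.update f x (f x - 1)) else x :: pvDropF xs f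

theorem pv_map_sum_getD (bins : List (List Int)) (j : Nat) :
    (bins.map List.sum).getD j 0 = (bins.getD j []).sum := by
  simp [List.getD, List.getElem?_map]; cases bins[j]? <;> simp

theorem pv_getD_set_ne {α : Type} (l : List α) (i j : Nat) (a d : α) (h : i ≠ j) :
    (l.set i a).getD j d = l.getD j d := by
  simp [List.getD, List.getElem?_set_ne h]

theorem pv_getD_set_self {α : Type} (l : List α) (i : Nat) (a d : α) (h : i < l.length) :
    (l.set i a).getD i d = a := by
  simp [List.getD, List.getElem?_set_self h]

theorem pv_set_getD_self {α : Type} (l : List α) (n : Nat) (d : α) (h : n < l.length) :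
    l.set n (l.getD n d) = l := by
  have hg : l.getD n d = l[n] := by simp [List.getD_eq_getElem?_getD, List.getElem?_eq_getElem h]
  rw [hg, List.set_getElem_self]

theorem pv_erase_sum (l : List Int) (v : Int) (h : v ∈ l) :
    (l.erase v).sum = l.sum - v := by
  have hp := (List.perm_cons_erase h).sum_eq
  simp only [List.sum_cons] at hp
  omega

theorem pv_eb_append (snap M : List Int) (v : Int) :
    pvEb snap (M ++ [v]) = (pvEb snap M).erase v := by
  simp [pvEb, List.foldl_append]

-- B's one-pass counter rebuild, functional form
theorem pv_dropCounted_fold (xs : List Int) :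
    ∀ (acc : List Int) (cnt : PySem.Dict Int Int),
    (xs.foldl (fun (acc : List Int × PySem.Dict Int Int) x =>
        if 0 < acc.2.getD x 0 then (acc.1, acc.2.insert x (acc.2.getD x 0 - 1))
        else (acc.1 ++ [x], acc.2)) (acc, cnt)).1
      = acc ++ pvDropF xs (fun v => cnt.getD v 0) := by
  induction xs with
  | nil => intro acc cnt; simp [pvDropF]
  | cons x xs ih =>
    intro acc cnt
    simp only [List.foldl_cons]
    by_cases hx : 0 < cnt.getD x 0
    · rw [if_pos hx]
      show (xs.foldl _ (acc, cnt.insert x (cnt.getD x 0 - 1))).1 = _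
      rw [ih acc (cnt.insert x (cnt.getD x 0 - 1))]
      have hf : (fun v => (cnt.insert x (cnt.getD x 0 - 1)).getD v 0)
          = Function.update (fun v => cnt.getD v 0) x ((fun v => cnt.getD v 0) x - 1) := by
        funext v
        rw [PySem.Dict.getD_insert, Function.update_apply]
      rw [hf]
      simp [pvDropF, hx]
    · rw [if_neg hx]
      show (xs.foldl _ (acc ++ [x], cnt)).1 = _
      rw [ih (acc ++ [x]) cnt]
      simp [pvDropF, hx]

theorem pv_dropF_zero (xs : List Int) : pvDropF xs (fun _ => (0 : Int)) = xs := by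
  induction xs with
  | nil => rfl
  | cons x xs ih => simp [pvDropF, ih]

theorem pv_dropF_erase (xs : List Int) :
    ∀ (f : Int → Int), (∀ u, 0 ≤ f u) → ∀ (v : Int),
    (pvDropF xs f).erase v = pvDropF xs (Function.update f v (f v + 1)) := by
  induction xs with
  | nil => intro f _ v; rfl
  | cons x xs ih =>
    intro f hf v
    by_cases hx : x = v
    · subst hx
      by_cases h0 : 0 < f x
      · have hupd : Function.update (Function.update f x (f x - 1)) x
            ((Function.update f x (f x - 1)) x + 1) = f := by
          rw [Function.update_self, Function.update_idem]
          have : f x - 1 + 1 = f x := by omega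
          rw [this, Function.update_eq_self]
        have hupd2 : Function.update (Function.update f x (f x + 1)) x (f x + 1 - 1) = f := by
          rw [Function.update_idem]
          have : f x + 1 - 1 = f x := by omega
          rw [this, Function.update_eq_self]
        have hnn : ∀ u, 0 ≤ (Function.update f x (f x - 1)) u := by
          intro u; rw [Function.update_apply]; split
          · omega
          · exact hf u
        simp only [pvDropF, if_pos h0, Function.update_self,
          if_pos (show 0 < f x + 1 by omega)]
        rw [ih _ hnn x, hupd, hupd2]
      · have hz : f x = 0 := le_antisymm (by omega) (hf x)
        simp only [pvDropF, if_neg h0, Function.update_self,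
          if_pos (show 0 < f x + 1 by omega), List.erase_cons_head]
        rw [Function.update_idem]
        have : f x + 1 - 1 = f x := by omega
        rw [this, Function.update_eq_self]
    · have hgx : (Function.update f v (f v + 1)) x = f x := by
        rw [Function.update_apply, if_neg hx]
      by_cases h0 : 0 < f x
      · simp only [pvDropF, if_pos h0, hgx]
        rw [ih _ (by intro u; have h1 := hf u; have h2 := hf x; rw [Function.update_apply]; split_ifs <;> omega) v]
        congr 1
        rw [Function.update_comm hx]
        congr 2
        rw [Function.update_apply, if_neg (Ne.symm hx)]
      · simp only [pvDropF, if_neg h0, hgx]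
        rw [List.erase_cons_tail (by simpa using hx), ih f hf v]

theorem pv_eb_eq_dropF (snap : List Int) :
    ∀ (M : List Int), pvEb snap M = pvDropF snap (fun v => (M.count v : Int)) := by
  intro M
  induction M using List.reverseRecOn with
  | nil =>
    have : (fun v => (((([] : List Int)).count v : Nat) : Int)) = fun _ => (0 : Int) := by
      funext v; simp
    rw [this, pv_dropF_zero]; rfl
  | append_singleton M v ih =>
    rw [pv_eb_append, ih, pv_dropF_erase snap _ (by intro u; positivity) v]
    congr 1
    funext u
    rw [Function.update_apply]
    by_cases hu : u = v
    · subst hu; simp [List.count_append]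
    · have hu' : ¬ v = u := fun h => hu h.symm
      simp [List.count_append, hu, hu']

-- B's dict counter agrees with the abstract count, so the rebuild equals A's erase chain
theorem pv_dropCounted_eq (snap M : List Int) :
    pvDropCounted snap
      (M.foldl (fun (d : PySem.Dict Int Int) v => d.insert v (d.getD v 0 + 1)) PySem.Dict.empty)
      = pvEb snap M := by
  unfold pvDropCounted
  rw [pv_dropCounted_fold snap []]
  have hf : (fun v => (M.foldl (fun (d : PySem.Dict Int Int) v => d.insert v (d.getD v 0 + 1))
      PySem.Dict.empty).getD v 0) = fun v => ((M.count v : Nat) : Int) := by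
    funext v
    rw [PySem.Dict.getD_foldl_insert_add_one]
    simp
  rw [hf, ← pv_eb_eq_dropF]
  rfl

-- first match on the sorted list computes A's min-over-filter
theorem pv_fit_eq (tamanos : List Int) (s dflt : Int) :
    pvFit (PySem.List.sorted tamanos (fun t => t)) s dflt = pvMinGe tamanos s dflt := by
  set ts := PySem.List.sorted tamanos (fun t => t) with hts
  have hpw : List.Pairwise (fun a b => a ≤ b) ts := PySem.List.sorted_pairwise tamanos (fun t => t)
  unfold pvFit pvMinGe PySem.List.minD
  cases hfind : ts.find? (fun t => decide (s ≤ t)) with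
  | none =>
    have hnil : tamanos.filter (fun t => decide (s ≤ t)) = [] := by
      rw [List.filter_eq_nil_iff]
      intro t ht
      have := List.find?_eq_none.mp hfind t ((PySem.List.mem_sorted _ _ _ _).mpr ht)
      simpa using this
    rw [hnil, (PySem.List.min?_eq_none_iff _ _).mpr rfl]
    rfl
  | some t0 =>
    obtain ⟨l1, l2, hsplit, hbefore⟩ := List.find?_eq_some_iff_append.mp hfind |>.2
    have hst0 : s ≤ t0 := by simpa using List.find?_some hfind
    have ht0ts : t0 ∈ ts := List.mem_of_find?_eq_some hfind
    have ht0f : t0 ∈ tamanos.filter (fun t => decide (s ≤ t)) := by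
      rw [List.mem_filter]
      exact ⟨(PySem.List.mem_sorted _ _ _ _).mp ht0ts, by simpa using hst0⟩
    have hmin : ∀ t ∈ tamanos.filter (fun t => decide (s ≤ t)), t0 ≤ t := by
      intro t ht
      rw [List.mem_filter] at ht
      have htts : t ∈ ts := (PySem.List.mem_sorted _ _ _ _).mpr ht.1
      rw [hsplit] at htts hpw
      rcases List.mem_append.mp htts with h1 | h2
      · exact absurd (by simpa using ht.2) (by simpa using hbefore t h1)
      · rcases List.mem_cons.mp h2 with h3 | h4
        · omega
        · exact List.rel_of_pairwise_cons (List.pairwise_append.mp hpw).2.1 h4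
    cases hm : PySem.List.min? (tamanos.filter (fun t => decide (s ≤ t))) (fun t => t) with
    | none =>
      rw [PySem.List.min?_eq_none_iff] at hm
      rw [hm] at ht0f
      exact absurd ht0f (List.not_mem_nil)
    | some m =>
      have hmmem := PySem.List.min?_mem hm
      have h1 : t0 ≤ m := hmin m hmmem
      have h2 : m ≤ t0 := PySem.List.min?_isMin hm t0 ht0f
      simp [le_antisymm h1 h2]

-- ===== the inner (i, j) pass =====

theorem pv_set2 {α : Type} (l : List α) (i j : Nat) (hij : i ≠ j) (a b a' : α) :
    ((l.set i a).set j b).set i a' = (l.set i a').set j b := by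
  rw [List.set_comm _ _ (Ne.symm hij), List.set_set]


-- invariant-carrying induction over the unprocessed suffix R of the snapshot:
-- A's in-place fold stays equal to the rebuild of B's arithmetic decision fold
theorem pv_pair_ind (tamanos : List Int) (i j : Nat) (hij : i ≠ j)
    (bins0 : List (List Int)) (caps0 : List Int)
    (hi : i < bins0.length) (hj : j < bins0.length) (hcap : bins0.length ≤ caps0.length) :
    ∀ (R M : List Int) (si sj ci cj : Int),
    R.Subperm (pvEb (bins0.getD i []) M) →
    si = (pvEb (bins0.getD i []) M).sum → sj = (bins0.getD j [] ++ M).sum →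
    (R.foldl (pvAStep tamanos i j)
        ((bins0.set i (pvEb (bins0.getD i []) M)).set j (bins0.getD j [] ++ M),
         (caps0.set i ci).set j cj)
      = ((bins0.set i (pvEb (bins0.getD i [])
            (R.foldl (pvDecStep (PySem.List.sorted tamanos (fun t => t))) (M, si, sj, ci, cj)).1)).set j
            (bins0.getD j [] ++ (R.foldl (pvDecStep (PySem.List.sorted tamanos (fun t => t))) (M, si, sj, ci, cj)).1),
         (caps0.set i (R.foldl (pvDecStep (PySem.List.sorted tamanos (fun t => t))) (M, si, sj, ci, cj)).2.2.2.1).set j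
            (R.foldl (pvDecStep (PySem.List.sorted tamanos (fun t => t))) (M, si, sj, ci, cj)).2.2.2.2))
    ∧ (R.foldl (pvDecStep (PySem.List.sorted tamanos (fun t => t))) (M, si, sj, ci, cj)).2.1
        = (pvEb (bins0.getD i []) (R.foldl (pvDecStep (PySem.List.sorted tamanos (fun t => t))) (M, si, sj, ci, cj)).1).sum
    ∧ (R.foldl (pvDecStep (PySem.List.sorted tamanos (fun t => t))) (M, si, sj, ci, cj)).2.2.1
        = (bins0.getD j [] ++ (R.foldl (pvDecStep (PySem.List.sorted tamanos (fun t => t))) (M, si, sj, ci, cj)).1).sum := by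
  intro R
  induction R with
  | nil =>
    intro M si sj ci cj _ hsi hsj
    exact ⟨rfl, hsi, hsj⟩
  | cons obj R ih =>
    intro M si sj ci cj hsub hsi hsj
    subst hsi; subst hsj
    have hmem : obj ∈ pvEb (bins0.getD i []) M := hsub.subset List.mem_cons_self
    have hi' : i < caps0.length := lt_of_lt_of_le hi hcap
    have hj' : j < caps0.length := lt_of_lt_of_le hj hcap
    have hsubR : R.Subperm (pvEb (bins0.getD i []) (M ++ [obj])) := by
      rw [pv_eb_append]
      exact (List.subperm_cons obj).mp (hsub.trans (List.perm_cons_erase hmem).subperm)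
    have hgbj : ((bins0.set i (pvEb (bins0.getD i []) M)).set j (bins0.getD j [] ++ M)).getD j []
        = bins0.getD j [] ++ M := pv_getD_set_self _ j _ _ (by simpa using hj)
    have hgbi : ((bins0.set i (pvEb (bins0.getD i []) M)).set j (bins0.getD j [] ++ M)).getD i []
        = pvEb (bins0.getD i []) M := by
      rw [pv_getD_set_ne _ j i _ _ (Ne.symm hij), pv_getD_set_self _ i _ _ hi]
    have hgci : ((caps0.set i ci).set j cj).getD i 0 = ci := by
      rw [pv_getD_set_ne _ j i _ _ (Ne.symm hij), pv_getD_set_self _ i _ _ hi']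
    have hgcj : ((caps0.set i ci).set j cj).getD j 0 = cj :=
      pv_getD_set_self _ j _ _ (by simpa using hj')
    simp only [List.foldl_cons]
    by_cases hcond : (bins0.getD j [] ++ M).sum + obj ≤ cj
    · have hB : pvDecStep (PySem.List.sorted tamanos (fun t => t))
          (M, (pvEb (bins0.getD i []) M).sum, (bins0.getD j [] ++ M).sum, ci, cj) obj
          = (M ++ [obj], (pvEb (bins0.getD i []) (M ++ [obj])).sum,
             (bins0.getD j [] ++ (M ++ [obj])).sum,
             pvFit (PySem.List.sorted tamanos (fun t => t)) ((pvEb (bins0.getD i []) (M ++ [obj])).sum) ci,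
             pvFit (PySem.List.sorted tamanos (fun t => t)) ((bins0.getD j [] ++ (M ++ [obj])).sum) cj) := by
        unfold pvDecStep
        dsimp only
        rw [if_pos hcond]
        have e1 : (pvEb (bins0.getD i []) M).sum - obj = (pvEb (bins0.getD i []) (M ++ [obj])).sum := by
          rw [pv_eb_append, pv_erase_sum _ _ hmem]
        have e2 : (bins0.getD j [] ++ M).sum + obj = (bins0.getD j [] ++ (M ++ [obj])).sum := by
          rw [← List.append_assoc]
          simp [List.sum_append]
          omega
        rw [e1, e2]
      have hA : pvAStep tamanos i j
          ((bins0.set i (pvEb (bins0.getD i []) M)).set j (bins0.getD j [] ++ M),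
           (caps0.set i ci).set j cj) obj
          = ((bins0.set i (pvEb (bins0.getD i []) (M ++ [obj]))).set j (bins0.getD j [] ++ (M ++ [obj])),
             (caps0.set i (pvFit (PySem.List.sorted tamanos (fun t => t))
                 ((pvEb (bins0.getD i []) (M ++ [obj])).sum) ci)).set j
               (pvFit (PySem.List.sorted tamanos (fun t => t))
                 ((bins0.getD j [] ++ (M ++ [obj])).sum) cj)) := by
        unfold pvAStep
        dsimp only
        rw [hgbj, hgcj, if_pos hcond, hgbi, hgci,
          PySem.List.remove?_eq_some_erase _ obj hmem, Option.getD_some, ← pv_eb_append]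
        rw [pv_getD_set_ne _ i j _ _ hij, hgcj]
        rw [pv_fit_eq tamanos ((pvEb (bins0.getD i []) (M ++ [obj])).sum) ci,
          pv_fit_eq tamanos ((bins0.getD j [] ++ (M ++ [obj])).sum) cj]
        rw [pv_set2 _ i j hij, pv_set2 _ i j hij, List.set_set, List.set_set,
          List.append_assoc]
      rw [hA, hB]
      exact ih (M ++ [obj]) _ _ _ _ hsubR rfl rfl
    · have hB : pvDecStep (PySem.List.sorted tamanos (fun t => t))
          (M, (pvEb (bins0.getD i []) M).sum, (bins0.getD j [] ++ M).sum, ci, cj) obj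
          = (M, (pvEb (bins0.getD i []) M).sum, (bins0.getD j [] ++ M).sum, ci, cj) := by
        unfold pvDecStep
        dsimp only
        rw [if_neg hcond]
      have hA : pvAStep tamanos i j
          ((bins0.set i (pvEb (bins0.getD i []) M)).set j (bins0.getD j [] ++ M),
           (caps0.set i ci).set j cj) obj
          = ((bins0.set i (pvEb (bins0.getD i []) M)).set j (bins0.getD j [] ++ M),
             (caps0.set i ci).set j cj) := by
        unfold pvAStep
        dsimp only
        rw [hgbj, hgcj, if_neg hcond]
      rw [hA, hB]
      exact ih M _ _ ci cj ((List.sublist_cons_self obj R).subperm.trans hsub) rfl rfl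

-- one (i, j) pair: A's pass and B's two-phase pass act identically on related states
theorem pv_pair_rel (tamanos : List Int) (i j : Nat) (hij : i ≠ j)
    (stA : List (List Int) × List Int) (stB : List (List Int) × List Int × List Int)
    (hrel : pvRel stA stB) (hi : i < stA.1.length) (hj : j < stA.1.length)
    (hcap : stA.1.length ≤ stA.2.length) :
    pvRel (pvAInner tamanos i j stA) (pvPair (PySem.List.sorted tamanos (fun t => t)) i j stB) ∧
      (pvAInner tamanos i j stA).1.length = stA.1.length ∧
      (pvAInner tamanos i j stA).2.length = stA.2.length := by
  obtain ⟨binsA, capsA⟩ := stA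
  obtain ⟨binsB, capsB, sumsB⟩ := stB
  obtain ⟨hb, hc, hs⟩ := hrel
  dsimp only at hb hc hs hi hj hcap ⊢
  subst hb; subst hc; subst hs
  have hi' : i < capsB.length := lt_of_lt_of_le hi hcap
  have hj' : j < capsB.length := lt_of_lt_of_le hj hcap
  have hinit1 : (binsB.set i (pvEb (binsB.getD i []) [])).set j (binsB.getD j [] ++ []) = binsB := by
    show (binsB.set i (binsB.getD i [])).set j (binsB.getD j [] ++ []) = binsB
    rw [pv_set_getD_self _ i _ hi, List.append_nil, pv_set_getD_self _ j _ hj]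
  have hinit2 : (capsB.set i (capsB.getD i 0)).set j (capsB.getD j 0) = capsB := by
    rw [pv_set_getD_self _ i _ hi', pv_set_getD_self _ j _ hj']
  obtain ⟨mEq, mSi, mSj⟩ := pv_pair_ind tamanos i j hij binsB capsB hi hj hcap
    (binsB.getD i []) [] (binsB.getD i []).sum (binsB.getD j []).sum
    (capsB.getD i 0) (capsB.getD j 0) (List.Subperm.refl _) rfl (by rw [List.append_nil])
  rw [hinit1, hinit2] at mEq
  set r := ((binsB.getD i []).foldl (pvDecStep (PySem.List.sorted tamanos (fun t => t)))
      ([], (binsB.getD i []).sum, (binsB.getD j []).sum, capsB.getD i 0, capsB.getD j 0)) with hr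
  have hAeq : pvAInner tamanos i j (binsB, capsB)
      = ((binsB.set i (pvEb (binsB.getD i []) r.1)).set j (binsB.getD j [] ++ r.1),
         (capsB.set i r.2.2.2.1).set j r.2.2.2.2) := by
    unfold pvAInner
    dsimp only
    exact mEq
  have hBeq : pvPair (PySem.List.sorted tamanos (fun t => t)) i j (binsB, capsB, binsB.map List.sum)
      = ((binsB.set i (pvEb (binsB.getD i []) r.1)).set j (binsB.getD j [] ++ r.1),
         ((capsB.set i r.2.2.2.1).set j r.2.2.2.2,
          ((binsB.map List.sum).set i r.2.1).set j r.2.2.1)) := by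
    unfold pvPair
    dsimp only
    rw [pv_map_sum_getD binsB i, pv_map_sum_getD binsB j, pv_dropCounted_eq]
  have hsum : ((binsB.set i (pvEb (binsB.getD i []) r.1)).set j (binsB.getD j [] ++ r.1)).map List.sum
      = ((binsB.map List.sum).set i r.2.1).set j r.2.2.1 := by
    rw [List.map_set, List.map_set, ← mSi, ← mSj]
  refine ⟨⟨?_, ?_, ?_⟩, ?_, ?_⟩
  · rw [hAeq, hBeq]
  · rw [hAeq, hBeq]
  · rw [hAeq, hBeq, hsum]
  · rw [hAeq]; simp
  · rw [hAeq]; simp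

-- the two nested index loops preserve the correspondence
theorem pv_loops_rel (tamanos : List Int) (is : List Nat) (n : Nat)
    (h_is : ∀ i ∈ is, i < n) :
    ∀ (stA : List (List Int) × List Int) (stB : List (List Int) × List Int × List Int),
    pvRel stA stB → stA.1.length = n → n ≤ stA.2.length →
    pvRel
      (is.foldl (fun st i => (List.range' (i + 1) (n - (i + 1))).foldl
        (fun st j => pvAInner tamanos i j st) st) stA)
      (is.foldl (fun st i => (List.range' (i + 1) (n - (i + 1))).foldl
        (fun st j => pvPair (PySem.List.sorted tamanos (fun t => t)) i j st) st) stB) ∧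
      (is.foldl (fun st i => (List.range' (i + 1) (n - (i + 1))).foldl
        (fun st j => pvAInner tamanos i j st) st) stA).1.length = n ∧
      n ≤ (is.foldl (fun st i => (List.range' (i + 1) (n - (i + 1))).foldl
        (fun st j => pvAInner tamanos i j st) st) stA).2.length := by
  induction is with
  | nil => intro stA stB hrel hlen hcl; exact ⟨hrel, hlen, hcl⟩
  | cons i is ih =>
    intro stA stB hrel hlen hcl
    have hi : i < n := h_is i List.mem_cons_self
    simp only [List.foldl_cons]
    have hj : ∀ (js : List Nat), (∀ j ∈ js, i + 1 ≤ j ∧ j < i + 1 + (n - (i + 1))) →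
        ∀ (stA : List (List Int) × List Int) (stB : List (List Int) × List Int × List Int),
        pvRel stA stB → stA.1.length = n → n ≤ stA.2.length →
        pvRel (js.foldl (fun st j => pvAInner tamanos i j st) stA)
            (js.foldl (fun st j => pvPair (PySem.List.sorted tamanos (fun t => t)) i j st) stB) ∧
          (js.foldl (fun st j => pvAInner tamanos i j st) stA).1.length = n ∧
          n ≤ (js.foldl (fun st j => pvAInner tamanos i j st) stA).2.length := by
      intro js
      induction js with
      | nil => intro _ stA stB hrel hlen hcl; exact ⟨hrel, hlen, hcl⟩
      | cons j js ihj =>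
        intro hbnd stA stB hrel hlen hcl
        obtain ⟨hb1, hb2⟩ := hbnd j List.mem_cons_self
        have hij : i ≠ j := by omega
        have h1 := pv_pair_rel tamanos i j hij stA stB hrel (by omega) (by omega) (by omega)
        simp only [List.foldl_cons]
        exact ihj (fun j hjm => hbnd j (List.mem_cons_of_mem _ hjm)) _ _ h1.1
          (h1.2.1.trans hlen) (by rw [h1.2.2]; exact hcl)
    have h1 := hj (List.range' (i + 1) (n - (i + 1)))
      (fun j hjm => by
        have := List.mem_range'_1.mp hjm
        omega) stA stB hrel hlen hcl
    exact ih (fun i him => h_is i (List.mem_cons_of_mem _ him)) _ _ h1.1 h1.2.1 h1.2.2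

-- ===== the cleanup =====

theorem pv_final_aux (caps : List Int) (bins : List (List Int)) :
    ∀ (s : Int) (acc : List (List Int) × List Int),
    (PySem.List.enumerate bins s).foldl
      (fun (acc : List (List Int) × List Int) p =>
        if !p.2.isEmpty then (acc.1 ++ [p.2], acc.2 ++ [PySem.List.pyGetD caps p.1 0]) else acc)
      acc =
    (acc.1 ++ ((PySem.List.enumerate bins s).filter (fun p => !p.2.isEmpty)).map (fun p => p.2),
     acc.2 ++ ((PySem.List.enumerate bins s).filter (fun p => !p.2.isEmpty)).map
       (fun p => PySem.List.pyGetD caps p.1 0)) := by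
  induction bins with
  | nil => intro s acc; simp [PySem.List.enumerate]
  | cons b bs ih =>
    intro s acc
    rw [PySem.List.enumerate_cons, List.foldl_cons, ih (s + 1)]
    by_cases hb : b = [] <;> simp [hb, List.append_assoc]

theorem pv_map_snd_filter_enumerate (bins : List (List Int)) :
    ∀ (s : Int),
    ((PySem.List.enumerate bins s).filter (fun p => !p.2.isEmpty)).map (fun p => p.2) =
      bins.filter (fun b => !b.isEmpty) := by
  induction bins with
  | nil => intro s; simp [PySem.List.enumerate]
  | cons b bs ih =>
    intro s
    rw [PySem.List.enumerate_cons]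
    by_cases hb : b = [] <;> simp [hb, ih (s + 1)]

theorem pv_zip_fst (bs : List (List Int)) :
    ∀ (cs : List Int), bs.length ≤ cs.length →
    ((bs.zip cs).filter (fun p => !p.1.isEmpty)).map (fun p => p.1)
      = bs.filter (fun b => !b.isEmpty) := by
  induction bs with
  | nil => intro cs _; simp
  | cons b bs ih =>
    intro cs hlen
    cases cs with
    | nil => simp at hlen
    | cons c cs =>
      simp only [List.zip_cons_cons, List.filter_cons]
      by_cases hb : b = [] <;> simp [hb, ih cs (by simpa using hlen)]

theorem pv_zip_snd (bs : List (List Int)) :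
    ∀ (cs : List Int) (k : Nat), bs.length + k ≤ cs.length →
    ((PySem.List.enumerate bs (k : Int)).filter (fun p => !p.2.isEmpty)).map
        (fun p => PySem.List.pyGetD cs p.1 0)
      = ((bs.zip (cs.drop k)).filter (fun p => !p.1.isEmpty)).map (fun p => p.2) := by
  induction bs with
  | nil => intro cs k _; simp [PySem.List.enumerate]
  | cons b bs ih =>
    intro cs k hlen
    have hk : k < cs.length := by simp at hlen; omega
    rw [PySem.List.enumerate_cons, List.drop_eq_getElem_cons hk, List.zip_cons_cons]
    have hcast : (k : Int) + 1 = ((k + 1 : Nat) : Int) := by push_cast; ring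
    have hgd : PySem.List.pyGetD cs (k : Int) 0 = cs[k] := by
      rw [PySem.List.pyGetD_natCast]
      simp [List.getD_eq_getElem?_getD, List.getElem?_eq_getElem hk]
    have ihs := ih cs (k + 1) (by simp at hlen ⊢; omega)
    rw [hcast]
    by_cases hb : b = []
    · rw [List.filter_cons, List.filter_cons, if_neg (by simp [hb]), if_neg (by simp [hb])]
      exact ihs
    · rw [List.filter_cons, List.filter_cons, if_pos (by simp [hb]),
        if_pos (by simp [hb]), List.map_cons, List.map_cons, hgd, ihs]

-- ===== VERDICT (by name: the statement is the Claim_ definition above) =====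
theorem busqueda_local_spec : Claim_equal_busqueda_local := by
  intro solucion capacidades tamanos_disponibles _hdom hpre
  unfold Spec_busqueda_local busqueda_local busqueda_local_alt
  obtain ⟨⟨h1, h2, -⟩, hlen, hclen⟩ := pv_loops_rel tamanos_disponibles
    (List.range solucion.length) solucion.length
    (fun i hi => List.mem_range.mp hi)
    (solucion, capacidades) (solucion, capacidades, solucion.map List.sum)
    ⟨rfl, rfl, rfl⟩ rfl hpre
  rw [pv_final_aux _ _ 0 ([], [])]
  set stB := (List.range solucion.length).foldl
      (fun st i => (List.range' (i + 1) (solucion.length - (i + 1))).foldl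
        (fun st j => pvPair (PySem.List.sorted tamanos_disponibles (fun t => t)) i j st) st)
      (solucion, capacidades, solucion.map List.sum) with hstB
  set stA := (List.range solucion.length).foldl
      (fun st i => (List.range' (i + 1) (solucion.length - (i + 1))).foldl
        (fun st j => pvAInner tamanos_disponibles i j st) st)
      (solucion, capacidades) with hstA
  have ha : (((PySem.List.enumerate stA.1 0).filter (fun p => !p.2.isEmpty)).map (fun p => p.2))
      = ((stB.1.zip stB.2.1).filter (fun p => !p.1.isEmpty)).map (fun p => p.1) := by
    rw [h1, h2, pv_map_snd_filter_enumerate stA.1 0, ← pv_zip_fst stA.1 stA.2 (by omega)]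
  have hb : (((PySem.List.enumerate stA.1 0).filter (fun p => !p.2.isEmpty)).map
        (fun p => PySem.List.pyGetD stA.2 p.1 0))
      = ((stB.1.zip stB.2.1).filter (fun p => !p.1.isEmpty)).map (fun p => p.2) := by
    rw [h1, h2]
    have := pv_zip_snd stA.1 stA.2 0 (by omega)
    simpa using this
  simp only [List.nil_append]
  rw [ha, hb]
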